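-- pv_equiv track=rewrite | github.com/jjzhang329/algo-daily | structy/stack/nesting_scores.py | nesting_score
-- ===== SOURCE A (Python) =====
-- def nesting_score(string):
--   pass # todo
--   stack = [0]
--
--   for char in string:
--     if char == '[':
--       stack.append(0)
--     else:
--       last = stack.pop()
--       if last == 0:
--         stack[-1] += (1)
--       else:
--         stack[-1] += 2 * last
--
--   return stack.pop()
-- ===== SOURCE B (Python) =====
-- def nesting_score(string):
--   # The result is the score of the innermost group still open at the end of the
--   # string.  Scan from the right: an innermost pair "[]" whose closer has d not-yet-
--   # matched closers to its right (itself included) contributes 2^(d-1), and the scan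
--   # can stop as soon as it reaches an opener that closes nothing.
--   total = 0
--   pending = 0          # closers seen so far and not yet matched
--   prev_close = False
--   for ch in reversed(string):
--     if ch == '[':
--       if pending == 0:
--         break          # this opener is never closed: the scored group starts here
--       if prev_close:
--         total += 1 << (pending - 1)
--       pending -= 1
--       prev_close = False
--     else:
--       pending += 1
--       prev_close = True
--   if pending:
--     raise ValueError('unbalanced brackets')
--   return total
-- ===== Notes on version B (the rewrite author's own statement) =====
-- stated objective: alternative
-- what changed: B replaces A's forward pass over a stack of per-frame accumulators by a single backward arithmetic pass: scanning from the right it adds 2^(pending-1) for each innermost pair (a closed form of the 0->+1 / s->+2s combination rule, with pending = closers not yet matched) and stops at the first opener that closes nothing, since that opener starts the innermost still-open group whose score is the result; no stack is kept.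
import Mathlib
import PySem

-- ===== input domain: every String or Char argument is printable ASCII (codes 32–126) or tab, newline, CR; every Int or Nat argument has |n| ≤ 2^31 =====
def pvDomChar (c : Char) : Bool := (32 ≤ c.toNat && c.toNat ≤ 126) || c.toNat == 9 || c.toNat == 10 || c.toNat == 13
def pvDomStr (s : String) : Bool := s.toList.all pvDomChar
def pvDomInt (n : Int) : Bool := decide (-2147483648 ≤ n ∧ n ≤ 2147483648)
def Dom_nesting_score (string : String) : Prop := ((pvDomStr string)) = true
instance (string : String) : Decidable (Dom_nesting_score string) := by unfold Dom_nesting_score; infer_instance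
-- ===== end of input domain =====

-- B replaces A's forward pass over a stack of per-frame accumulators by one backward
-- arithmetic pass that adds 2^(pending-1) per innermost pair and stops at the first
-- unclosed opener (objective: alternative algorithm, same O(n) cost, no stack).

-- ===== PORT A =====
-- stack is kept head-first (list head = Python stack[-1]); `none` = IndexError
-- (pop / stack[-1] on an empty stack), excluded by Pre_ below.
def pvContrib (last : Int) : Int := if last = 0 then 1 else 2 * last

def runA : List Int → List Char → Option (List Int)
  | s, [] => some s
  | s, c :: rest =>
    if c = '[' then runA (0 :: s) rest
    else
      match s with
      | last :: top :: t => runA ((top + pvContrib last) :: t) rest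
      | _ => none

def nesting_score (string : String) : Int :=
  match runA [0] string.toList with
  | some (x :: _) => x
  | _ => 0   -- unreachable under Pre_ (Python raises IndexError on these inputs)

-- ===== PORT B =====
-- scanBack consumes the reversed character list; `none` = the ValueError B raises when
-- `pending` is nonzero after the loop.  Python's `1 << (pending - 1)` is 2^(pending-1),
-- exact here since pending ≥ 1 whenever prev_close holds.
def scanBack : List Char → Int → Int → Bool → Option Int
  | [], total, pending, _ => if pending = 0 then some total else none
  | c :: rest, total, pending, prevClose =>
    if c = '[' then
      if pending = 0 then some total   -- `break`, then the `if pending` check passes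
      else
        scanBack rest (total + (if prevClose then (2:Int) ^ (pending - 1).toNat else 0))
          (pending - 1) false
    else scanBack rest total (pending + 1) true

def nesting_score_alt (string : String) : Int :=
  (scanBack string.toList.reverse 0 0 false).getD 0   -- `none` is unreachable under Pre_

-- ===== PRECONDITION & SPEC =====
-- Pre_ excludes exactly the strings on which Python A raises IndexError: those with a
-- prefix containing more closers (non-'[' characters) than openers.
def Pre_nesting_score (string : String) : Prop :=
  ∀ p ∈ string.toList.inits, p.countP (· != '[') ≤ p.countP (· == '[')
instance (string : String) : Decidable (Pre_nesting_score string) := by unfold Pre_nesting_score; infer_instance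

def pvWitness_nesting_score : String := "[[]]"

def Spec_nesting_score (string : String) (out : Int) : Prop := out = nesting_score_alt string
instance (string : String) (out : Int) : Decidable (Spec_nesting_score string out) := by unfold Spec_nesting_score; infer_instance

-- ===== CLAIM (what is proved, stated in full; the proofs are below) =====
def Claim_equal_nesting_score : Prop := ∀ (string : String), Dom_nesting_score string → Pre_nesting_score string → Spec_nesting_score string (nesting_score string)

-- ===== LEMMAS AND PROOFS =====

-- openers / closers of a segment (every non-'[' character acts as a closer in A)
def opensP (l : List Char) : Nat := l.countP (· == '[')
def closesP (l : List Char) : Nat := l.countP (· != '[')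

-- prefix-balanced / fully balanced segments
def PB (l : List Char) : Prop := ∀ p, p <+: l → closesP p ≤ opensP p
def Bal (l : List Char) : Prop := PB l ∧ closesP l = opensP l

-- the value A computes for a segment, read off from its machine
def Vv (b : List Char) : Int :=
  match runA [0] b with
  | some (x :: _) => x
  | _ => 0

-- scanBack split into "partial run": `.inl r` = early result, `.inr` = final state
def sbp : List Char → Int → Int → Bool → Sum (Option Int) (Int × Int × Bool)
  | [], t, p, pc => .inr (t, p, pc)
  | c :: rest, t, p, pc =>
    if c = '[' then
      if p = 0 then .inl (some t)
      else sbp rest (t + (if pc then (2:Int) ^ (p - 1).toNat else 0)) (p - 1) false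
    else sbp rest t (p + 1) true

@[simp] lemma opensP_nil : opensP [] = 0 := rfl
@[simp] lemma closesP_nil : closesP [] = 0 := rfl
@[simp] lemma opensP_append (x y : List Char) : opensP (x ++ y) = opensP x + opensP y := by
  simp [opensP]
@[simp] lemma closesP_append (x y : List Char) : closesP (x ++ y) = closesP x + closesP y := by
  simp [closesP]
lemma opensP_cons (c : Char) (l : List Char) :
    opensP (c :: l) = opensP l + (if c = '[' then 1 else 0) := by
  by_cases h : c = '[' <;> simp [opensP, h]
lemma closesP_cons (c : Char) (l : List Char) :
    closesP (c :: l) = closesP l + (if c = '[' then 0 else 1) := by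
  by_cases h : c = '[' <;> simp [closesP, h]

lemma sbp_append (x y : List Char) : ∀ (t p : Int) (pc : Bool),
    sbp (x ++ y) t p pc =
      match sbp x t p pc with
      | .inl r => .inl r
      | .inr (t', p', pc') => sbp y t' p' pc' := by
  induction x with
  | nil => intro t p pc; simp [sbp]
  | cons c rest ih =>
    intro t p pc
    by_cases hc : c = '['
    · by_cases hp : p = 0
      · simp [sbp, hc, hp]
      · simp [sbp, hc, hp, ih]
    · simp [sbp, hc, ih]

lemma scanBack_eq_sbp (x : List Char) : ∀ (t p : Int) (pc : Bool),
    scanBack x t p pc =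
      match sbp x t p pc with
      | .inl r => r
      | .inr (t', p', _) => if p' = 0 then some t' else none := by
  induction x with
  | nil => intro t p pc; simp [scanBack, sbp]
  | cons c rest ih =>
    intro t p pc
    by_cases hc : c = '['
    · by_cases hp : p = 0
      · simp [scanBack, sbp, hc, hp]
      · simp [scanBack, sbp, hc, hp, ih]
    · simp [scanBack, sbp, hc, ih]

lemma runA_append (a b : List Char) : ∀ s, runA s (a ++ b) = (runA s a).bind (fun s' => runA s' b) := by
  induction a with
  | nil => intro s; simp [runA]
  | cons c rest ih =>
    intro s
    by_cases hc : c = '['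
    · simp [runA, hc, ih]
    · match s with
      | [] => simp [runA, hc]
      | [x] => simp [runA, hc]
      | x :: y :: t => simp [runA, hc, ih]

-- A never raises while the prefix balance stays below the stack height
lemma runA_no_raise (a : List Char) : ∀ s : List Int,
    (∀ p, p <+: a → closesP p < opensP p + s.length) → ∃ s', runA s a = some s' := by
  induction a with
  | nil => intro s _; exact ⟨s, rfl⟩
  | cons c rest ih =>
    intro s hbal
    by_cases hc : c = '['
    · have ⟨s', hs'⟩ := ih (0 :: s) (by
        intro p hp
        have h2 := hbal (c :: p) (List.prefix_cons_iff.mpr (Or.inr ⟨p, rfl, hp⟩))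
        simp only [opensP_cons, closesP_cons, hc, if_pos, List.length_cons] at h2 ⊢
        omega)
      exact ⟨s', by simpa [runA, hc] using hs'⟩
    · have hlen : 2 ≤ s.length := by
        have := hbal [c] ⟨rest, rfl⟩
        simp only [opensP_cons, closesP_cons, if_neg hc, opensP_nil, closesP_nil] at this
        omega
      match s, hlen with
      | x :: y :: t, _ =>
        have ⟨s', hs'⟩ := ih ((y + pvContrib x) :: t) (by
          intro p hp
          have h2 := hbal (c :: p) (List.prefix_cons_iff.mpr (Or.inr ⟨p, rfl, hp⟩))
          simp only [opensP_cons, closesP_cons, if_neg hc, List.length_cons] at h2 ⊢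
          omega)
        exact ⟨s', by simpa [runA, hc] using hs'⟩

lemma bal_nil : Bal ([] : List Char) :=
  ⟨fun p hp => by simp [List.prefix_nil.mp hp], rfl⟩

-- prefixes of an append decompose
lemma prefix_split {p x y : List Char} (h : p <+: x ++ y) :
    p <+: x ∨ ∃ q, q <+: y ∧ p = x ++ q := by
  by_cases hle : p.length ≤ x.length
  · exact Or.inl (List.prefix_of_prefix_length_le h (x.prefix_append y) hle)
  · have hxp : x <+: p := List.prefix_of_prefix_length_le (x.prefix_append y) h (by omega)
    obtain ⟨q, rfl⟩ := hxp
    obtain ⟨t, ht⟩ := h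
    rw [List.append_assoc] at ht
    exact Or.inr ⟨q, ⟨t, List.append_cancel_left ht⟩, rfl⟩

lemma pb_append {x y : List Char} (hx : Bal x) (hy : PB y) : PB (x ++ y) := by
  intro p hp
  rcases prefix_split hp with h | ⟨q, hq, rfl⟩
  · exact hx.1 p h
  · have h1 := hy q hq
    have h2 := hx.2
    simp only [opensP_append, closesP_append]
    omega

lemma bal_append {x y : List Char} (hx : Bal x) (hy : Bal y) : Bal (x ++ y) := by
  refine ⟨pb_append hx hy.1, ?_⟩
  have h1 := hx.2
  have h2 := hy.2
  simp only [opensP_append, closesP_append]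
  omega

lemma pb_of_prefix {l p : List Char} (h : PB l) (hp : p <+: l) : PB p :=
  fun q hq => h q (hq.trans hp)

-- every prefix-balanced string is balanced or ends in an unclosed '[' with a balanced tail
lemma split_unmatched : ∀ (n : Nat) (l : List Char), l.length ≤ n → PB l →
    Bal l ∨ ∃ a b, l = a ++ '[' :: b ∧ Bal b := by
  intro n
  induction n with
  | zero =>
    intro l hlen _
    left
    have : l = [] := List.eq_nil_of_length_eq_zero (by omega)
    subst this
    exact bal_nil
  | succ n ih =>
    intro l hlen hpb
    rcases List.eq_nil_or_concat' l with rfl | ⟨l', c, rfl⟩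
    · exact Or.inl bal_nil
    · have hpb' : PB l' := pb_of_prefix hpb ⟨[c], rfl⟩
      by_cases hc : c = '['
      · subst hc
        exact Or.inr ⟨l', [], by simp, bal_nil⟩
      · -- c is a closer; l' cannot be balanced, so it splits, and c closes that group
        have hlen' : l'.length ≤ n := by simp at hlen; omega
        rcases ih l' hlen' hpb' with hbal | ⟨a, b, rfl, hb⟩
        · exfalso
          have h1 := hpb (l' ++ [c]) (List.prefix_refl _)
          have h2 := hbal.2
          simp only [opensP_append, closesP_append, opensP_cons, closesP_cons,
            if_neg hc, opensP_nil, closesP_nil] at h1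
          omega
        · -- l = a ++ ('[' :: b ++ [c]) with '[' :: b ++ [c] balanced; recurse on a
          have hu : Bal ('[' :: b ++ [c]) := by
            constructor
            · intro p hp
              rcases List.prefix_cons_iff.mp hp with rfl | ⟨q, rfl, hq⟩
              · simp
              · rcases prefix_split hq with h | ⟨r, hr, rfl⟩
                · have h1 := hb.1 q h
                  simp only [opensP_cons, closesP_cons, reduceIte]
                  omega
                · have h2 := hb.2
                  rcases List.prefix_cons_iff.mp hr with rfl | ⟨r', rfl, hr''⟩
                  · simp only [opensP_cons, closesP_cons, opensP_append, closesP_append,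
                      reduceIte, opensP_nil, closesP_nil]
                    omega
                  · rw [List.prefix_nil.mp hr'']
                    simp only [opensP_cons, closesP_cons, opensP_append, closesP_append,
                      reduceIte, if_neg hc, opensP_nil, closesP_nil]
                    omega
            · have h2 := hb.2
              simp only [opensP_cons, closesP_cons, opensP_append, closesP_append,
                reduceIte, if_neg hc, opensP_nil, closesP_nil]
              omega
          have hpa : PB a := pb_of_prefix hpb' ⟨'[' :: b, rfl⟩
          have hlena : a.length ≤ n := by
            simp at hlen
            omega
          rcases ih a hlena hpa with hbala | ⟨a', b', rfl, hb'⟩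
          · left
            have heq : a ++ '[' :: b ++ [c] = a ++ ('[' :: b ++ [c]) := by simp
            rw [heq]
            exact bal_append hbala hu
          · right
            refine ⟨a', b' ++ ('[' :: b ++ [c]), by simp, bal_append hb' hu⟩

-- a balanced nonempty segment splits off its last top-level group
lemma last_pair {b : List Char} (hb : Bal b) (hne : b ≠ []) :
    ∃ a w c, b = a ++ '[' :: w ++ [c] ∧ c ≠ '[' ∧ Bal a ∧ Bal w := by
  rcases List.eq_nil_or_concat' b with rfl | ⟨b', c, rfl⟩
  · exact absurd rfl hne
  · have hpb' : PB b' := pb_of_prefix hb.1 ⟨[c], rfl⟩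
    have hc : c ≠ '[' := by
      intro hc
      subst hc
      have h1 := hb.2
      have h2 := hpb' b' (List.prefix_refl _)
      simp only [opensP_append, closesP_append, opensP_cons, closesP_cons,
        reduceIte, opensP_nil, closesP_nil] at h1
      omega
    rcases split_unmatched b'.length b' le_rfl hpb' with hbal | ⟨a, w, rfl, hw⟩
    · exfalso
      have h1 := hb.2
      have h2 := hbal.2
      simp only [opensP_append, closesP_append, opensP_cons, closesP_cons,
        if_neg hc, opensP_nil, closesP_nil] at h1
      omega
    · refine ⟨a, w, c, rfl, hc, ?_, hw⟩
      have hpa : PB a := pb_of_prefix hpb' ⟨'[' :: w, rfl⟩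
      refine ⟨hpa, ?_⟩
      have h1 := hb.2
      have h2 := hw.2
      simp only [opensP_append, closesP_append, opensP_cons, closesP_cons,
        reduceIte, if_neg hc, opensP_nil, closesP_nil] at h1
      omega

-- main lemma: on a balanced segment b, A's machine adds Vv b to the top of any stack,
-- Vv b is nonnegative (positive when b is nonempty), and B's backward partial scan adds
-- 2^pending * Vv b to the total, restoring pending
lemma both_sides : ∀ (n : Nat) (b : List Char), b.length ≤ n → Bal b →
    (∀ (x : Int) (s : List Int), runA (x :: s) b = some ((x + Vv b) :: s)) ∧
    (0 ≤ Vv b) ∧ (b ≠ [] → 1 ≤ Vv b) ∧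
    (∀ (t p : Int) (pc : Bool), 0 ≤ p →
      sbp b.reverse t p pc = .inr (t + 2 ^ p.toNat * Vv b, p, if b.isEmpty then pc else false)) := by
  intro n
  induction n using Nat.strong_induction_on with
  | _ n ih =>
    intro b hlen hb
    rcases eq_or_ne b [] with rfl | hne
    · have h0 : Vv ([] : List Char) = 0 := by simp [Vv, runA]
      refine ⟨?_, by simp [h0], by simp, ?_⟩
      · intro x s; simp [runA, h0]
      · intro t p pc _; simp [sbp, h0]
    · obtain ⟨a, w, c, rfl, hc, ha, hw⟩ := last_pair hb hne
      have hlena : a.length < n := by simp at hlen; omega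
      have hlenw : w.length < n := by simp at hlen; omega
      have hn0 : 0 < n := by simp at hlen; omega
      obtain ⟨haF, haNN, _, haB⟩ := ih (n - 1) (by omega) a (by omega) ha
      obtain ⟨hwF, hwNN, hwPos, hwB⟩ := ih (n - 1) (by omega) w (by omega) hw
      -- forward: runA threads a, pushes, threads w, folds the closer
      have hwstep : ∀ (x : Int) (s : List Int),
          runA (x :: s) ('[' :: w) = some (Vv w :: x :: s) := by
        intro x s
        have h1 : runA (x :: s) ('[' :: w) = runA (0 :: x :: s) w := by simp [runA]
        rw [h1, hwF]
        simp
      have hfwd : ∀ (x : Int) (s : List Int),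
          runA (x :: s) (a ++ '[' :: w ++ [c]) = some ((x + (Vv a + pvContrib (Vv w))) :: s) := by
        intro x s
        rw [runA_append (a ++ '[' :: w) [c], runA_append a ('[' :: w), haF]
        simp only [Option.bind_some]
        rw [hwstep]
        simp only [Option.bind_some]
        simp [runA, hc, add_assoc]
      have hV : Vv (a ++ '[' :: w ++ [c]) = Vv a + pvContrib (Vv w) := by
        simp only [Vv]
        rw [hfwd 0 []]
        simp only [zero_add]
        rfl
      have hposContrib : 1 ≤ pvContrib (Vv w) := by
        unfold pvContrib
        split_ifs with h
        · omega
        · have : 1 ≤ Vv w := hwPos (by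
            intro hwnil
            exact h (by simp [hwnil, Vv, runA]))
          omega
      refine ⟨by simp only [hV]; exact hfwd, by rw [hV]; omega, fun _ => by rw [hV]; omega, ?_⟩
      -- backward: the closer, then w reversed, then the opener, then a reversed
      intro t p pc hp
      have hrev : (a ++ '[' :: w ++ [c]).reverse = c :: (w.reverse ++ ('[' :: a.reverse)) := by
        simp
      rw [hrev]
      have hstep1 : sbp (c :: (w.reverse ++ ('[' :: a.reverse))) t p pc
          = sbp (w.reverse ++ ('[' :: a.reverse)) t (p + 1) true := by
        simp [sbp, hc]
      rw [hstep1, sbp_append, hwB t (p + 1) true (by omega)]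
      have hp1 : (p + 1) ≠ 0 := by omega
      have htn : (p + 1).toNat = p.toNat + 1 := by omega
      have htn2 : (p + 1 - 1).toNat = p.toNat := by omega
      have hig : ((a ++ '[' :: w ++ [c]).isEmpty) = false := by simp
      rcases eq_or_ne w [] with rfl | hwne
      · have hw0 : Vv ([] : List Char) = 0 := by simp [Vv, runA]
        simp only [List.isEmpty_nil, reduceIte]
        have hop : sbp ('[' :: a.reverse) (t + 2 ^ (p + 1).toNat * Vv ([] : List Char)) (p + 1) true
            = sbp a.reverse (t + 2 ^ p.toNat) p false := by
          simp [sbp, hp1, hw0]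
        rw [hop, haB _ p false hp, hig]
        have hV1 : Vv (a ++ '[' :: ([] : List Char) ++ [c]) = Vv a + 1 := by
          rw [hV, hw0]; rfl
        rw [hV1]
        simp only [Sum.inr.injEq, Prod.mk.injEq]
        refine ⟨by ring, trivial, by simp⟩
      · have hwe : w.isEmpty = false := by simpa using hwne
        rw [hwe]
        simp only [Bool.false_eq_true, if_false]
        have hwpos : 1 ≤ Vv w := hwPos hwne
        have hop : sbp ('[' :: a.reverse) (t + 2 ^ (p + 1).toNat * Vv w) (p + 1) false
            = sbp a.reverse (t + 2 ^ (p + 1).toNat * Vv w) p false := by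
          simp [sbp, hp1]
        rw [hop, haB _ p false hp, hig]
        have hcontrib : pvContrib (Vv w) = 2 * Vv w := by
          unfold pvContrib
          rw [if_neg (by omega)]
        simp only [Sum.inr.injEq, Prod.mk.injEq]
        refine ⟨by rw [hV, hcontrib, htn]; ring, trivial, by simp⟩

-- Pre_ in prefix form
lemma pre_prefix {string : String} (hpre : Pre_nesting_score string) :
    ∀ p, p <+: string.toList → closesP p ≤ opensP p := by
  intro p hp
  exact hpre p ((List.mem_inits _ _).mpr hp)

-- ===== VERDICT (by name: the statement is the Claim_ definition above) =====
theorem nesting_score_spec : Claim_equal_nesting_score := by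
  intro string _ hpre
  unfold Spec_nesting_score
  have hpre' : PB string.toList := pre_prefix hpre
  rcases split_unmatched string.toList.length string.toList le_rfl hpre' with hbal | ⟨a, b, hsplit, hb⟩
  · -- balanced: both sides return Vv of the whole string
    obtain ⟨hF, _, _, hB⟩ := both_sides string.toList.length string.toList le_rfl hbal
    have ha : nesting_score string = Vv string.toList := by
      unfold nesting_score
      rw [show ([(0:Int)] : List Int) = (0 : Int) :: [] from rfl, hF 0 []]
      simp
    have hb' : nesting_score_alt string = Vv string.toList := by
      unfold nesting_score_alt
      rw [scanBack_eq_sbp, hB 0 0 false le_rfl]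
      simp
    rw [ha, hb']
  · -- an unclosed '[' followed by the balanced tail b: both sides return Vv b
    obtain ⟨hF, _, _, hB⟩ := both_sides b.length b le_rfl hb
    have ⟨s1, hs1⟩ := runA_no_raise a [0] (by
      intro p hp
      have hpl : p <+: string.toList := by
        rw [hsplit]; exact hp.trans (a.prefix_append _)
      have := hpre' p hpl
      simp only [List.length_cons, List.length_nil]
      omega)
    have hstep : runA s1 ('[' :: b) = some (Vv b :: s1) := by
      have h1 : runA s1 ('[' :: b) = runA (0 :: s1) b := by simp [runA]
      rw [h1, hF 0 s1]
      simp
    have ha : nesting_score string = Vv b := by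
      unfold nesting_score
      rw [hsplit, runA_append a ('[' :: b), hs1]
      simp [hstep]
    have hbb : nesting_score_alt string = Vv b := by
      unfold nesting_score_alt
      rw [hsplit]
      have hrev : (a ++ '[' :: b).reverse = b.reverse ++ ('[' :: a.reverse) := by simp
      rw [hrev, scanBack_eq_sbp, sbp_append, hB 0 0 false le_rfl]
      simp [sbp]
    rw [ha, hbb]
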